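-- pv_equiv track=rewrite | github.com/HarryWgCN/Naive-Bayes-and-SVM-for-Text-Classification | analyze_codes/text_classification/word_count.py | get_b_from_a
-- ===== SOURCE A (Python) =====
-- def get_b_from_a(a):
--     B = {}
--     for file_class in a:
--         B[file_class] = {}
--         for word in a[file_class]:
--             B[file_class][word] = 0
--             for other_class in a:
--                 if other_class != file_class and word in a[other_class]:
--                     B[file_class][word] += a[other_class][word]
--     return B
-- ===== SOURCE B (Python) =====
-- def get_b_from_a(a):
--     total = {}
--     for d in a.values():
--         for w, c in d.items():
--             total[w] = total.get(w, 0) + c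
--     return {cls: {w: total[w] - c for w, c in d.items()} for cls, d in a.items()}
-- ===== Notes on version B (the rewrite author's own statement) =====
-- stated objective: faster
-- what changed: B computes each word's total count across all classes in one pass and returns total minus the own-class count, removing A's inner scan over all other classes for every (class, word) pair.
import Mathlib
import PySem

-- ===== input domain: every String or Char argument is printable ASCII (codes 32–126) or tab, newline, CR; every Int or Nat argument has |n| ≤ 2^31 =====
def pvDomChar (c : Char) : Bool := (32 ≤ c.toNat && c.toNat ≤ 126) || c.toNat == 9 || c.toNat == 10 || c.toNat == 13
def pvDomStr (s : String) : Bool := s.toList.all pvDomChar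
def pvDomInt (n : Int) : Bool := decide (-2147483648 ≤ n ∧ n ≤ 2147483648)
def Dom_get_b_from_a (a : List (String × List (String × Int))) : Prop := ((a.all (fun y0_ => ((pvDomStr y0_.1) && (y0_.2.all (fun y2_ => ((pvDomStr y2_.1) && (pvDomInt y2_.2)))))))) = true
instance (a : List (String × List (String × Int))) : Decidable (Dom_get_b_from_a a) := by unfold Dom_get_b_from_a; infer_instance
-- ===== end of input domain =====

-- B replaces A's inner scan over all other classes by one precomputed per-word total across all classes (total − own count).

-- ===== PORT A =====
-- the word loop of A for one class fc: B[fc][word] = 0, then for every other class add its count of word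
def pvAinner (a : List (String × List (String × Int))) (fc : String) (words : List (String × Int)) : PySem.Dict String Int :=
  words.foldl (fun inner wp =>
    a.foldl (fun inner oe =>
      if oe.1 ≠ fc ∧ ((PySem.Dict.mk oe.2).get? wp.1).isSome then
        inner.insert wp.1 (inner.getD wp.1 0 + (PySem.Dict.mk oe.2).getD wp.1 0)
      else inner) (inner.insert wp.1 0)) PySem.Dict.empty

def get_b_from_a (a : List (String × List (String × Int))) : List (String × List (String × Int)) :=
  (a.foldl (fun B e => B.insert e.1 (pvAinner a e.1 e.2)) PySem.Dict.empty).items.map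
    (fun p => (p.1, p.2.items))

-- ===== PORT B =====
-- total = {}; for d in a.values(): for w, c in d.items(): total[w] = total.get(w, 0) + c
def pvTotal (a : List (String × List (String × Int))) : PySem.Dict String Int :=
  a.foldl (fun t e => e.2.foldl (fun t q => t.insert q.1 (t.getD q.1 0 + q.2)) t) PySem.Dict.empty

-- the inner dict comprehension {w: total[w] - c for w, c in d.items()}
def pvBinner (total : PySem.Dict String Int) (words : List (String × Int)) : PySem.Dict String Int :=
  words.foldl (fun inner q => inner.insert q.1 (total.getD q.1 0 - q.2)) PySem.Dict.empty

def get_b_from_a_alt (a : List (String × List (String × Int))) : List (String × List (String × Int)) :=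
  let total := pvTotal a
  (a.foldl (fun B e => B.insert e.1 (pvBinner total e.2)) PySem.Dict.empty).items.map
    (fun p => (p.1, p.2.items))

-- ===== PRECONDITION & SPEC =====
-- Pre_ excludes association lists with duplicate class keys or duplicate word keys inside a class: those do not
-- represent any Python dict (the Python argument is a dict, which cannot carry duplicate keys).
def Pre_get_b_from_a (a : List (String × List (String × Int))) : Prop :=
  (a.map Prod.fst).Nodup ∧ ∀ e ∈ a, (e.2.map Prod.fst).Nodup
instance (a : List (String × List (String × Int))) : Decidable (Pre_get_b_from_a a) := by unfold Pre_get_b_from_a; infer_instance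

def pvWitness_get_b_from_a : (List (String × List (String × Int))) :=
  [("x", [("w", 1)]), ("y", [("w", 2), ("v", 3)])]

def Spec_get_b_from_a (a : List (String × List (String × Int))) (out : List (String × List (String × Int))) : Prop := out = get_b_from_a_alt a
instance (a : List (String × List (String × Int))) (out : List (String × List (String × Int))) : Decidable (Spec_get_b_from_a a out) := by unfold Spec_get_b_from_a; infer_instance

-- ===== CLAIM (what is proved, stated in full; the proofs are below) =====
def Claim_equal_get_b_from_a : Prop := ∀ (a : List (String × List (String × Int))), Dom_get_b_from_a a → Pre_get_b_from_a a → Spec_get_b_from_a a (get_b_from_a a)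

-- ===== LEMMAS AND PROOFS =====

-- the sum A's innermost loop accumulates for class fc and word w
def pvSA (a : List (String × List (String × Int))) (fc w : String) : Int :=
  (a.map (fun oe => if oe.1 ≠ fc ∧ ((PySem.Dict.mk oe.2).get? w).isSome then (PySem.Dict.mk oe.2).getD w 0 else 0)).sum

-- the per-word contribution of one class's word list, as B's total accumulates it
def pvWsum (l : List (String × Int)) (w : String) : Int :=
  (l.map (fun q => if q.1 = w then q.2 else 0)).sum

-- A's innermost loop collapses to a single insert of the accumulated sum
theorem pvA_inner_loop (l : List (String × List (String × Int))) (fc w : String)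
    (d : PySem.Dict String Int) (s : Int) :
    l.foldl (fun inner oe =>
        if oe.1 ≠ fc ∧ ((PySem.Dict.mk oe.2).get? w).isSome then
          inner.insert w (inner.getD w 0 + (PySem.Dict.mk oe.2).getD w 0)
        else inner) (d.insert w s)
      = d.insert w (s + pvSA l fc w) := by
  induction l generalizing s with
  | nil => simp [pvSA]
  | cons oe rest ih =>
      simp only [List.foldl_cons, pvSA, List.map_cons, List.sum_cons]
      split_ifs with h
      · rw [PySem.Dict.getD_insert_self, PySem.Dict.insert_insert_self, ih]
        simp [pvSA, add_assoc]
      · rw [ih]; simp [pvSA]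

-- B's total-building fold, one class: getD reads off pvWsum
theorem pvB_total_inner (l : List (String × Int)) (t : PySem.Dict String Int) (w : String) :
    (l.foldl (fun t q => t.insert q.1 (t.getD q.1 0 + q.2)) t).getD w 0
      = t.getD w 0 + pvWsum l w := by
  induction l generalizing t with
  | nil => simp [pvWsum]
  | cons q rest ih =>
      simp only [List.foldl_cons, pvWsum, List.map_cons, List.sum_cons]
      rw [ih]
      rw [PySem.Dict.getD_insert]
      by_cases h : w = q.1
      · simp [h, pvWsum]; omega
      · simp [h, Ne.symm h, pvWsum]

-- B's total over all classes
theorem pvB_total (a : List (String × List (String × Int))) (w : String) :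
    (pvTotal a).getD w 0 = (a.map (fun e => pvWsum e.2 w)).sum := by
  suffices h : ∀ (t : PySem.Dict String Int),
      (a.foldl (fun t e => e.2.foldl (fun t q => t.insert q.1 (t.getD q.1 0 + q.2)) t) t).getD w 0
        = t.getD w 0 + (a.map (fun e => pvWsum e.2 w)).sum by
    have := h PySem.Dict.empty
    simpa [pvTotal] using this
  induction a with
  | nil => simp
  | cons e rest ih =>
      intro t
      simp only [List.foldl_cons, List.map_cons, List.sum_cons]
      rw [ih, pvB_total_inner]
      omega

theorem pvWsum_not_mem (l : List (String × Int)) (w : String) (h : w ∉ l.map Prod.fst) :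
    pvWsum l w = 0 := by
  induction l with
  | nil => simp [pvWsum]
  | cons q rest ih =>
      simp only [List.map_cons, List.mem_cons] at h
      push Not at h
      simp only [pvWsum, List.map_cons, List.sum_cons]
      rw [if_neg (fun hq => h.1 hq.symm)]
      simpa [pvWsum] using ih h.2

-- on a duplicate-free word list the accumulated sum is exactly the dict lookup (0 when absent)
theorem pvWsum_nodup (l : List (String × Int)) (w : String) (h : (l.map Prod.fst).Nodup) :
    pvWsum l w = (PySem.Dict.mk l).getD w 0 := by
  induction l with
  | nil => simp [pvWsum, PySem.Dict.getD_eq_get?_getD, PySem.Dict.get?]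
  | cons q rest ih =>
      simp only [List.map_cons, List.nodup_cons] at h
      simp only [pvWsum, List.map_cons, List.sum_cons]
      rw [PySem.Dict.getD_eq_get?_getD, PySem.Dict.get?_mk_cons]
      by_cases hw : q.1 = w
      · rw [if_pos hw]
        simp only [hw, beq_self_eq_true, if_pos]
        have h0 : pvWsum rest w = 0 := pvWsum_not_mem rest w (hw ▸ h.1)
        simpa [pvWsum] using h0
      · rw [if_neg hw]
        simp only [beq_iff_eq, if_neg hw]
        rw [← PySem.Dict.getD_eq_get?_getD]
        simpa [pvWsum] using ih h.2

theorem pvGetD_zero_of_not_isSome (l : List (String × Int)) (w : String)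
    (h : ¬ ((PySem.Dict.mk l).get? w).isSome) :
    (PySem.Dict.mk l).getD w 0 = 0 := by
  rw [PySem.Dict.getD_eq_get?_getD]
  cases hg : (PySem.Dict.mk l).get? w with
  | none => rfl
  | some v => rw [hg] at h; simp at h

-- core arithmetic: total across all classes minus the own count = A's other-class sum
theorem pvCore (a : List (String × List (String × Int))) (fc w : String) (ws : List (String × Int)) (c : Int)
    (houter : (a.map Prod.fst).Nodup) (hinner : ∀ e ∈ a, (e.2.map Prod.fst).Nodup)
    (hmem : (fc, ws) ∈ a) (hw : (w, c) ∈ ws) :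
    (a.map (fun e => pvWsum e.2 w)).sum - c = pvSA a fc w := by
  induction a with
  | nil => simp at hmem
  | cons e rest ih =>
      simp only [List.map_cons, List.nodup_cons] at houter
      simp only [pvSA, List.map_cons, List.sum_cons]
      by_cases hfc : e.1 = fc
      · -- e is the (unique) fc entry, so e = (fc, ws)
        have he : e = (fc, ws) := by
          rcases List.mem_cons.mp hmem with h | h
          · exact h.symm
          · exact absurd (by rw [hfc]; exact List.mem_map.mpr ⟨(fc, ws), h, rfl⟩) houter.1
        have hwsnd : (ws.map Prod.fst).Nodup := by
          have := hinner e (List.mem_cons_self ..); rw [he] at this; exact this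
        have hc : (PySem.Dict.mk ws).getD w 0 = c :=
          PySem.Dict.getD_of_mem_items _ (by simpa using hw) (by simpa [PySem.Dict.keys] using hwsnd) 0
        have h1 : pvWsum e.2 w = c := by rw [he]; rw [pvWsum_nodup _ _ hwsnd, hc]
        have h2 : (if e.1 ≠ fc ∧ ((PySem.Dict.mk e.2).get? w).isSome then (PySem.Dict.mk e.2).getD w 0 else 0) = 0 := by
          rw [if_neg]; intro hcon; exact hcon.1 hfc
        rw [h1, h2]
        have hrest : (rest.map (fun e => pvWsum e.2 w)).sum
            = (rest.map (fun oe => if oe.1 ≠ fc ∧ ((PySem.Dict.mk oe.2).get? w).isSome then (PySem.Dict.mk oe.2).getD w 0 else 0)).sum := by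
          apply congrArg
          apply List.map_congr_left
          intro q hq
          have hqfc : q.1 ≠ fc := by
            intro hq1
            exact houter.1 (by rw [hfc]; exact List.mem_map.mpr ⟨q, hq, hq1⟩)
          have hqnd := hinner q (List.mem_cons_of_mem _ hq)
          by_cases hs : ((PySem.Dict.mk q.2).get? w).isSome
          · rw [if_pos ⟨hqfc, hs⟩, pvWsum_nodup _ _ hqnd]
          · rw [if_neg (fun hcon => hs hcon.2), pvWsum_nodup _ _ hqnd,
              pvGetD_zero_of_not_isSome _ _ hs]
        rw [hrest]; omega
      · -- e is not the fc entry
        have hmem' : (fc, ws) ∈ rest := by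
          rcases List.mem_cons.mp hmem with h | h
          · exact absurd (congrArg Prod.fst h.symm) hfc
          · exact h
        have hend := hinner e (List.mem_cons_self ..)
        have h1 : pvWsum e.2 w = (PySem.Dict.mk e.2).getD w 0 := pvWsum_nodup _ _ hend
        have h2 : (if e.1 ≠ fc ∧ ((PySem.Dict.mk e.2).get? w).isSome then (PySem.Dict.mk e.2).getD w 0 else 0)
            = (PySem.Dict.mk e.2).getD w 0 := by
          by_cases hs : ((PySem.Dict.mk e.2).get? w).isSome
          · rw [if_pos ⟨hfc, hs⟩]
          · rw [if_neg (fun hcon => hs hcon.2), pvGetD_zero_of_not_isSome _ _ hs]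
        have := ih houter.2 (fun q hq => hinner q (List.mem_cons_of_mem _ hq)) hmem'
        simp only [pvSA] at this
        rw [h1, h2]
        omega

-- ===== VERDICT (by name: the statement is the Claim_ definition above) =====
theorem get_b_from_a_spec : Claim_equal_get_b_from_a := by
  intro a _hdom hpre
  obtain ⟨houter, hinner⟩ := hpre
  unfold Spec_get_b_from_a get_b_from_a get_b_from_a_alt
  dsimp only
  rw [PySem.Dict.items_foldl_insert_fresh a (fun e => e.1) (fun e => pvAinner a e.1 e.2)
    PySem.Dict.empty (by intro x _; simp) houter]
  rw [PySem.Dict.items_foldl_insert_fresh a (fun e => e.1) (fun e => pvBinner (pvTotal a) e.2)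
    PySem.Dict.empty (by intro x _; simp) houter]
  simp only [PySem.Dict.empty, List.nil_append, List.map_map]
  apply List.map_congr_left
  intro e he
  simp only [Function.comp_apply]
  refine congrArg (fun l => (e.1, l)) ?_
  unfold pvAinner pvBinner
  rw [PySem.List.foldl_congr_mem' e.2 _ (fun inner wp => inner.insert wp.1 ((0:Int) + pvSA a e.1 wp.1))
    PySem.Dict.empty (by intro wp _ inner; exact pvA_inner_loop a e.1 wp.1 inner 0)]
  rw [PySem.Dict.items_foldl_insert_fresh e.2 (fun q => q.1) (fun wp => (0:Int) + pvSA a e.1 wp.1)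
    PySem.Dict.empty (by intro x _; simp) (hinner e he)]
  rw [PySem.Dict.items_foldl_insert_fresh e.2 (fun q => q.1) (fun q => (pvTotal a).getD q.1 0 - q.2)
    PySem.Dict.empty (by intro x _; simp) (hinner e he)]
  simp only [PySem.Dict.empty, List.nil_append]
  apply List.map_congr_left
  intro q hq
  refine congrArg (fun v => (q.1, v)) ?_
  rw [pvB_total]
  rw [← pvCore a e.1 q.1 e.2 q.2 houter hinner (by simpa using he) (by simpa using hq)]
  omega
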